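-- pv_equiv track=rewrite | github.com/cyb3r-Kn1ght/WSTG-to-RAG | retriever.py | group_by_clusters
-- ===== SOURCE A (Python) =====
-- from typing import List, Dict, Any, Optional, Tuple, Set
--
-- def group_by_clusters(ids: List[str], id2num: Dict[str,int], gap: int=3):
--     pairs = [(rid, id2num.get(rid, -1)) for rid in ids]
--     pairs.sort(key=lambda x: x[1])
--     clusters, cur, prev = [], [], None
--     for rid, n in pairs:
--         if prev is None or (n - prev) <= gap:
--             cur.append(rid)
--         else:
--             clusters.append(cur); cur=[rid]
--         prev = n
--     if cur: clusters.append(cur)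
--     return clusters
-- ===== SOURCE B (Python) =====
-- def group_by_clusters(ids, id2num, gap=3):
--     pairs = sorted(((rid, id2num.get(rid, -1)) for rid in ids), key=lambda x: x[1])
--     breaks = [i for i in range(1, len(pairs)) if pairs[i][1] - pairs[i - 1][1] > gap]
--     bounds = [0] + breaks + [len(pairs)]
--     return [[rid for rid, _ in pairs[a:b]]
--             for a, b in zip(bounds, bounds[1:]) if a < b]
-- ===== Notes on version B (the rewrite author's own statement) =====
-- stated objective: alternative
-- what changed: A builds clusters in one stateful scan with a current-cluster accumulator, a prev sentinel and a final flush; B instead computes the list of break indices (positions where the sorted numeric gap exceeds gap) in a comprehension and partitions the sorted pair list by slicing between consecutive boundaries.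
import Mathlib
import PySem

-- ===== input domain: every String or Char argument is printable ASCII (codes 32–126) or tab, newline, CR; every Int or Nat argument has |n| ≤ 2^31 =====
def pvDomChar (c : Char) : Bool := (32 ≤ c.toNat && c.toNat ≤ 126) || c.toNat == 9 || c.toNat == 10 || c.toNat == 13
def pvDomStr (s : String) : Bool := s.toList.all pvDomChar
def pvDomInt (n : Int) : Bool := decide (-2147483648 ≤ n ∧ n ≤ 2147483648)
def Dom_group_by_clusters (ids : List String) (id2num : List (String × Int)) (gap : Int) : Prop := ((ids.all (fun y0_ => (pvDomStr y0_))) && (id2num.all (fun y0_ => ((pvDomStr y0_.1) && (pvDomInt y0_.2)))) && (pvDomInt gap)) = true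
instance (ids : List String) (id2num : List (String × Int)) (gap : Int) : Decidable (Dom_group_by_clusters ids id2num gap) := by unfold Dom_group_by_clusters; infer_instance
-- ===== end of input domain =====

-- B replaces A's stateful scan (current cluster + prev sentinel + final flush) by computing the break
-- indices of the sorted pair list and slicing between consecutive boundaries (objective: alternative).

-- ===== PORT A =====
def group_by_clusters (ids : List String) (id2num : List (String × Int)) (gap : Int) : List (List String) :=
  let pairs := ids.map (fun rid => (rid, PySem.Dict.getD ⟨id2num⟩ rid (-1)))
  let pairs := PySem.List.sorted pairs (fun x => x.2)
  let st := pairs.foldl (fun (st : List (List String) × List String × Option Int) p =>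
      match st.2.2 with
      | none => (st.1, st.2.1 ++ [p.1], some p.2)
      | some prev =>
        if p.2 - prev ≤ gap then (st.1, st.2.1 ++ [p.1], some p.2)
        else (st.1 ++ [st.2.1], [p.1], some p.2)) ([], [], none)
  if st.2.1 ≠ [] then st.1 ++ [st.2.1] else st.1

-- ===== PORT B =====
def group_by_clusters_alt (ids : List String) (id2num : List (String × Int)) (gap : Int) : List (List String) :=
  let pairs := PySem.List.sorted (ids.map (fun rid => (rid, PySem.Dict.getD ⟨id2num⟩ rid (-1)))) (fun x => x.2)
  let breaks := (PySem.List.pyRange 1 (pairs.length : Int)).filter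
      (fun i => decide (gap < (PySem.List.pyGetD pairs i ("", 0)).2 - (PySem.List.pyGetD pairs (i - 1) ("", 0)).2))
  let bounds := 0 :: (breaks ++ [(pairs.length : Int)])
  ((bounds.zip bounds.tail).filter (fun ab => decide (ab.1 < ab.2))).map
    (fun ab => (PySem.List.slice pairs (some ab.1) (some ab.2)).map Prod.fst)

-- ===== PRECONDITION & SPEC =====
def Spec_group_by_clusters (ids : List String) (id2num : List (String × Int)) (gap : Int) (out : List (List String)) : Prop := out = group_by_clusters_alt ids id2num gap
instance (ids : List String) (id2num : List (String × Int)) (gap : Int) (out : List (List String)) : Decidable (Spec_group_by_clusters ids id2num gap out) := by unfold Spec_group_by_clusters; infer_instance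

-- ===== CLAIM (what is proved, stated in full; the proofs are below) =====
def Claim_equal_group_by_clusters : Prop := ∀ (ids : List String) (id2num : List (String × Int)) (gap : Int), Dom_group_by_clusters ids id2num gap → Spec_group_by_clusters ids id2num gap (group_by_clusters ids id2num gap)

-- ===== LEMMAS AND PROOFS =====

-- canonical recursive grouping of a pair list, given the number of the previous element
def pvGrp (gap prev : Int) (cur : List String) : List (String × Int) → List (List String)
  | [] => [cur]
  | p :: t => if p.2 - prev ≤ gap then pvGrp gap p.2 (cur ++ [p.1]) t else cur :: pvGrp gap p.2 [p.1] t

-- A's loop step and final flush, and the whole post-sort scan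
def pvStep (gap : Int) (st : List (List String) × List String × Option Int) (p : String × Int) :
    List (List String) × List String × Option Int :=
  match st.2.2 with
  | none => (st.1, st.2.1 ++ [p.1], some p.2)
  | some prev =>
    if p.2 - prev ≤ gap then (st.1, st.2.1 ++ [p.1], some p.2)
    else (st.1 ++ [st.2.1], [p.1], some p.2)

def pvFin (st : List (List String) × List String × Option Int) : List (List String) :=
  if st.2.1 ≠ [] then st.1 ++ [st.2.1] else st.1

def pvScan (gap : Int) (l : List (String × Int)) : List (List String) :=
  pvFin (l.foldl (pvStep gap) ([], [], none))

-- B's post-sort break/slice computation, as a function of the sorted list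
def pvBreaks (gap : Int) (l : List (String × Int)) : List Int :=
  (PySem.List.pyRange 1 (l.length : Int)).filter
      (fun i => decide (gap < (PySem.List.pyGetD l i ("", 0)).2 - (PySem.List.pyGetD l (i - 1) ("", 0)).2))

def pvSegTail (l : List (String × Int)) (bs : List Int) : List (List String) :=
  ((bs.zip bs.tail).filter (fun ab => decide (ab.1 < ab.2))).map
    (fun ab => (PySem.List.slice l (some ab.1) (some ab.2)).map Prod.fst)

def pvSeg (gap : Int) (l : List (String × Int)) : List (List String) :=
  pvSegTail l (0 :: (pvBreaks gap l ++ [(l.length : Int)]))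

theorem pvScan_spec (ids : List String) (id2num : List (String × Int)) (gap : Int) :
    group_by_clusters ids id2num gap
      = pvScan gap (PySem.List.sorted (ids.map (fun rid => (rid, PySem.Dict.getD ⟨id2num⟩ rid (-1)))) (fun x => x.2)) := rfl

theorem pvSeg_spec (ids : List String) (id2num : List (String × Int)) (gap : Int) :
    group_by_clusters_alt ids id2num gap
      = pvSeg gap (PySem.List.sorted (ids.map (fun rid => (rid, PySem.Dict.getD ⟨id2num⟩ rid (-1)))) (fun x => x.2)) := rfl

-- ===== A-side: the scan computes pvGrp =====

theorem pvScan_eq_grp (gap : Int) : ∀ (t : List (String × Int)) (cls : List (List String)) (cur : List String) (prev : Int), cur ≠ [] →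
    pvFin (t.foldl (pvStep gap) (cls, cur, some prev)) = cls ++ pvGrp gap prev cur t := by
  intro t
  induction t with
  | nil => intro cls cur prev h; simp [pvFin, pvGrp, h]
  | cons p t ih =>
    intro cls cur prev h
    rw [List.foldl_cons]
    show pvFin (t.foldl (pvStep gap)
        (if p.2 - prev ≤ gap then (cls, cur ++ [p.1], some p.2) else (cls ++ [cur], [p.1], some p.2))) = _
    split_ifs with hg
    · rw [ih _ _ _ (by simp)]
      simp [pvGrp, hg]
    · rw [ih _ _ _ (by simp)]
      simp [pvGrp, hg]

-- ===== B-side helper lemmas =====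

theorem pvGetD_shift {α : Type} (x : α) (t : List α) (i : Int) (d : α) (h : 0 ≤ i) :
    PySem.List.pyGetD (x :: t) (i + 1) d = PySem.List.pyGetD t i d := by
  obtain ⟨k, rfl⟩ := Int.eq_ofNat_of_zero_le h
  have e : ((k : Int) + 1) = ((k + 1 : Nat) : Int) := by push_cast; ring
  rw [e, PySem.List.pyGetD_natCast, PySem.List.pyGetD_natCast, List.getD_cons_succ]

theorem pvSlice_shift {α : Type} (x : α) (t : List α) (a b : Int) (ha : 0 ≤ a) (hb : 0 ≤ b) :
    PySem.List.slice (x :: t) (some (a + 1)) (some (b + 1)) = PySem.List.slice t (some a) (some b) := by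
  rw [PySem.List.slice_toNat _ (by omega) (by omega), PySem.List.slice_toNat _ ha hb]
  have e1 : (a + 1).toNat = a.toNat + 1 := by omega
  have e2 : (b + 1).toNat - (a + 1).toNat = b.toNat - a.toNat := by omega
  rw [e2, e1, List.drop_succ_cons]

theorem pvRange_shift (a b : Int) :
    PySem.List.pyRange (a + 1) (b + 1) = (PySem.List.pyRange a b).map (· + 1) := by
  rw [PySem.List.pyRange_one, PySem.List.pyRange_one, List.map_map]
  have e : (b + 1 - (a + 1)) = b - a := by ring
  rw [e]
  apply List.map_congr_left
  intro k _
  show a + 1 + (k : Int) = a + (k : Int) + 1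
  ring

theorem pvBreaks_nil (gap : Int) : pvBreaks gap [] = [] := by
  unfold pvBreaks
  rw [show ((([] : List (String × Int)).length : Int)) = 0 by simp]
  rw [PySem.List.pyRange_one_eq_nil (by norm_num)]
  rfl

theorem pvBreaks_singleton (gap : Int) (p : String × Int) : pvBreaks gap [p] = [] := by
  unfold pvBreaks
  rw [show (([p] : List (String × Int)).length : Int) = 1 by simp]
  rw [PySem.List.pyRange_one_eq_nil (by norm_num)]
  rfl

theorem pvBreaks_pos (gap : Int) (l : List (String × Int)) : ∀ i ∈ pvBreaks gap l, 1 ≤ i := by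
  intro i hi
  unfold pvBreaks at hi
  exact (PySem.List.mem_pyRange_one.mp (List.mem_filter.mp hi).1).1

theorem pvBreaks_cons (gap : Int) (p q : String × Int) (t : List (String × Int)) :
    pvBreaks gap (p :: q :: t) =
      (if gap < q.2 - p.2 then [1] else []) ++ (pvBreaks gap (q :: t)).map (· + 1) := by
  unfold pvBreaks
  have hlen : (((p :: q :: t) : List (String × Int)).length : Int) = (((q :: t) : List (String × Int)).length : Int) + 1 := by
    simp
  rw [hlen]
  have hlq : (((q :: t) : List (String × Int)).length : Int) = (t.length : Int) + 1 := by simp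
  have h1 : (1 : Int) < (((q :: t) : List (String × Int)).length : Int) + 1 := by omega
  rw [PySem.List.pyRange_one_cons h1, List.filter_cons, pvRange_shift, List.filter_map]
  have hcong : List.filter
        ((fun i => decide (gap < (PySem.List.pyGetD (p :: q :: t) i ("", 0)).2
            - (PySem.List.pyGetD (p :: q :: t) (i - 1) ("", 0)).2)) ∘ (· + 1))
        (PySem.List.pyRange 1 (((q :: t) : List (String × Int)).length : Int))
      = List.filter
        (fun i => decide (gap < (PySem.List.pyGetD (q :: t) i ("", 0)).2
            - (PySem.List.pyGetD (q :: t) (i - 1) ("", 0)).2))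
        (PySem.List.pyRange 1 (((q :: t) : List (String × Int)).length : Int)) := by
    apply List.filter_congr
    intro i hi
    have hi1 : (1 : Int) ≤ i := (PySem.List.mem_pyRange_one.mp hi).1
    show decide (gap < (PySem.List.pyGetD (p :: q :: t) (i + 1) ("", 0)).2
        - (PySem.List.pyGetD (p :: q :: t) (i + 1 - 1) ("", 0)).2) = _
    have e0 : i + 1 - 1 = i := by ring
    have e1 := pvGetD_shift p (q :: t) i ("", 0) (by omega)
    have e2 : PySem.List.pyGetD (p :: q :: t) i ("", 0) = PySem.List.pyGetD (q :: t) (i - 1) ("", 0) := by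
      have ei : i = (i - 1) + 1 := by ring
      rw [ei, pvGetD_shift p (q :: t) (i - 1) ("", 0) (by omega)]
      rw [show i - 1 + 1 - 1 = i - 1 by ring]
    rw [e0, e1, e2]
  rw [hcong]
  by_cases hbr : gap < q.2 - p.2
  · norm_num [hbr, PySem.List.pyGetD_ofNat']
  · norm_num [hbr, PySem.List.pyGetD_ofNat']

theorem pvSegTail_cons_cons (l : List (String × Int)) (a b : Int) (rest : List Int) :
    pvSegTail l (a :: b :: rest) =
      (if a < b then [(PySem.List.slice l (some a) (some b)).map Prod.fst] else []) ++ pvSegTail l (b :: rest) := by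
  unfold pvSegTail
  simp only [List.tail_cons, List.zip_cons_cons, List.filter_cons]
  by_cases h : a < b
  · simp [h]
  · simp [h]

theorem pvSegTail_single (l : List (String × Int)) (b : Int) : pvSegTail l [b] = [] := rfl

theorem pvSegTail_shift (p : String × Int) (l : List (String × Int)) (bs : List Int)
    (hbs : ∀ b ∈ bs, 0 ≤ b) :
    pvSegTail (p :: l) (bs.map (· + 1)) = pvSegTail l bs := by
  unfold pvSegTail
  rw [← List.map_tail, List.zip_map, List.filter_map, List.map_map]
  have hfc : List.filter ((fun ab : Int × Int => decide (ab.1 < ab.2)) ∘ Prod.map (· + 1) (· + 1)) (bs.zip bs.tail)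
      = List.filter (fun ab : Int × Int => decide (ab.1 < ab.2)) (bs.zip bs.tail) := by
    apply List.filter_congr
    rintro ⟨a, b⟩ _
    simp only [Function.comp_apply, Prod.map_apply]
    exact decide_eq_decide.mpr (by omega)
  rw [hfc]
  apply List.map_congr_left
  rintro ⟨a, b⟩ hab
  obtain ⟨ha, hb⟩ := List.of_mem_zip (List.mem_filter.mp hab).1
  simp only [Function.comp_apply, Prod.map_apply]
  exact congrArg (List.map Prod.fst)
    (pvSlice_shift p l a b (hbs a ha) (hbs b (List.mem_of_mem_tail hb)))

theorem pvGrp_prefix (gap : Int) : ∀ (t : List (String × Int)) (c : String) (cur : List String) (prev : Int),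
    pvGrp gap prev (c :: cur) t = (c :: (pvGrp gap prev cur t).headI) :: (pvGrp gap prev cur t).tail := by
  intro t
  induction t with
  | nil => intro c cur prev; simp [pvGrp]
  | cons p t ih =>
    intro c cur prev
    simp only [pvGrp]
    split_ifs with hg
    · rw [show (c :: cur) ++ [p.1] = c :: (cur ++ [p.1]) by simp, ih]
    · simp

-- ===== B-side: the break/slice partition computes pvGrp =====

theorem pvSeg_eq_grp (gap : Int) : ∀ (t : List (String × Int)) (p : String × Int),
    pvSeg gap (p :: t) = pvGrp gap p.2 [p.1] t := by
  intro t
  induction t with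
  | nil =>
    intro p
    unfold pvSeg
    rw [pvBreaks_singleton]
    rw [show (([p] : List (String × Int)).length : Int) = 1 by simp]
    rw [show ((0 : Int) :: ([] ++ [(1 : Int)])) = 0 :: (1 : Int) :: [] by rfl]
    rw [pvSegTail_cons_cons, if_pos (by norm_num : (0 : Int) < 1), pvSegTail_single]
    have hs : PySem.List.slice [p] (some (0 : Int)) (some 1) = [p] := by
      rw [PySem.List.slice_toNat _ (by norm_num) (by norm_num)]
      rfl
    simp [hs, pvGrp]
  | cons q t ih =>
    intro p
    have hq1 : pvGrp gap p.2 [p.1] (q :: t) =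
        if q.2 - p.2 ≤ gap then pvGrp gap q.2 [p.1, q.1] t else [p.1] :: pvGrp gap q.2 [q.1] t := by
      simp [pvGrp]
    unfold pvSeg
    rw [pvBreaks_cons]
    have hlen : (((p :: q :: t) : List (String × Int)).length : Int) = (((q :: t) : List (String × Int)).length : Int) + 1 := by simp
    rw [hlen]
    set B := pvBreaks gap (q :: t) with hB
    set L := (((q :: t) : List (String × Int)).length : Int) with hL
    have hbsrw : ((if gap < q.2 - p.2 then [(1 : Int)] else []) ++ B.map (· + 1)) ++ [L + 1]
        = (if gap < q.2 - p.2 then [(1 : Int)] else []) ++ (B ++ [L]).map (· + 1) := by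
      rw [List.map_append, List.append_assoc]
      rfl
    rw [hbsrw]
    have hLpos : (0 : Int) < L := by
      have hlq : (((q :: t) : List (String × Int)).length : Int) = (t.length : Int) + 1 := by simp
      omega
    have hpos : ∀ b ∈ B ++ [L], 0 < b := by
      intro b hb
      rcases List.mem_append.mp hb with h | h
      · rw [hB] at h
        have := pvBreaks_pos gap (q :: t) b h
        omega
      · have hbl : b = L := by simpa using h
        omega
    obtain ⟨b0, rest, hcons⟩ : ∃ b0 rest, B ++ [L] = b0 :: rest := by
      rcases B with _ | ⟨x, xs⟩
      · exact ⟨L, [], rfl⟩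
      · exact ⟨x, xs ++ [L], rfl⟩
    have hb0 : 0 < b0 := hpos b0 (by rw [hcons]; exact List.mem_cons_self)
    have hrestpos : ∀ b ∈ rest, 0 < b := by
      intro b hb
      exact hpos b (by rw [hcons]; exact List.mem_cons_of_mem _ hb)
    have hshift : pvSegTail (p :: q :: t) ((b0 + 1) :: rest.map (· + 1)) = pvSegTail (q :: t) (b0 :: rest) := by
      have h := pvSegTail_shift p (q :: t) (b0 :: rest) (by
        intro b hb
        rcases List.mem_cons.mp hb with h | h
        · omega
        · exact le_of_lt (hrestpos b h))
      simpa using h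
    have hseg' : pvSeg gap (q :: t)
        = (PySem.List.slice (q :: t) (some (0 : Int)) (some b0)).map Prod.fst :: pvSegTail (q :: t) (b0 :: rest) := by
      unfold pvSeg
      rw [← hB, ← hL, hcons, pvSegTail_cons_cons, if_pos hb0]
      simp
    rw [hcons]
    simp only [List.map_cons]
    by_cases hbr : gap < q.2 - p.2
    · rw [if_pos hbr]
      simp only [List.singleton_append]
      rw [pvSegTail_cons_cons, if_pos (by norm_num : (0 : Int) < 1)]
      rw [pvSegTail_cons_cons, if_pos (by omega : (1 : Int) < b0 + 1)]
      rw [hshift]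
      have hs01 : (PySem.List.slice (p :: q :: t) none (some (1 : Int))).map Prod.fst = [p.1] := by
        rw [PySem.List.slice_to _ (by norm_num)]
        rfl
      have hs1b : PySem.List.slice (p :: q :: t) (some (1 : Int)) (some (b0 + 1))
          = PySem.List.slice (q :: t) (some (0 : Int)) (some b0) := by
        have h := pvSlice_shift p (q :: t) 0 b0 le_rfl (le_of_lt hb0)
        simpa using h
      rw [hq1, if_neg (by omega), ← ih q, hseg']
      simp [hs01, hs1b]
    · rw [if_neg hbr]
      simp only [List.nil_append]
      rw [pvSegTail_cons_cons, if_pos (by omega : (0 : Int) < b0 + 1)]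
      rw [hshift]
      have hs0b : (PySem.List.slice (p :: q :: t) none (some (b0 + 1))).map Prod.fst
          = p.1 :: (PySem.List.slice (q :: t) none (some b0)).map Prod.fst := by
        rw [PySem.List.slice_to _ (by omega), PySem.List.slice_to _ (by omega)]
        rw [show (b0 + 1).toNat = b0.toNat + 1 by omega]
        simp
      rw [hq1, if_pos (by omega)]
      rw [show ([p.1, q.1] : List String) = p.1 :: [q.1] by rfl]
      rw [pvGrp_prefix, ← ih q, hseg']
      simp [hs0b]

-- ===== combining =====

theorem pvMain (gap : Int) (l : List (String × Int)) : pvScan gap l = pvSeg gap l := by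
  cases l with
  | nil =>
    rw [show pvScan gap [] = [] from rfl]
    unfold pvSeg
    rw [pvBreaks_nil]
    rw [show ((([] : List (String × Int)).length : Int)) = 0 by simp]
    rw [show ((0 : Int) :: ([] ++ [(0 : Int)])) = (0 : Int) :: (0 : Int) :: [] by rfl]
    rw [pvSegTail_cons_cons, if_neg (by norm_num), pvSegTail_single]
    rfl
  | cons p t =>
    unfold pvScan
    rw [List.foldl_cons]
    rw [show pvStep gap ([], [], none) p = ([], [p.1], some p.2) from rfl]
    rw [pvScan_eq_grp gap t [] [p.1] p.2 (by simp), pvSeg_eq_grp]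
    simp

-- ===== VERDICT (by name: the statement is the Claim_ definition above) =====
theorem group_by_clusters_spec : Claim_equal_group_by_clusters := by
  intro ids id2num gap _
  show _ = _
  rw [pvScan_spec, pvSeg_spec, pvMain]
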